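-- pv_equiv track=rewrite | github.com/noaa-afsc-mace/salmon_presence | quantifying/Quantifier.py | convert_presence_to_chunks
-- ===== SOURCE A (Python) =====
-- def convert_presence_to_chunks(frame_list):
--     """
--     Converts list of frames to presence list of form [[start frame, end frame],...]
--     Does NOT consider min_presence_length
--
--     Args:
--     frame_list: list frames
--
--     Returns:
--     presence_list: list of lists with start and end frames of each individual salmon: [[start frame, end frame],...]
--     """
--     presence_list = []
--     nums = sorted(set(frame_list))
--     gaps = [[s, e] for s, e in zip(nums, nums[1:]) if s+1 < e]
--     edges = iter(nums[:1] + sum(gaps, []) + nums[-1:])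
--     intermediate = list(zip(edges, edges))
--     for i in intermediate:
--         start_frame, end_frame = i
--         presence_list.append([start_frame, end_frame])
--     return presence_list
-- ===== SOURCE B (Python) =====
-- def convert_presence_to_chunks(frame_list):
--     nums = sorted(set(frame_list))
--     if not nums:
--         return []
--     presence_list = []
--     start = prev = nums[0]
--     for x in nums[1:]:
--         if x == prev + 1:
--             prev = x
--         else:
--             presence_list.append([start, prev])
--             start = prev = x
--     presence_list.append([start, prev])
--     return presence_list
-- ===== Notes on version B (the rewrite author's own statement) =====
-- stated objective: faster
-- what changed: Replaces A's gap-table construction (zip of nums with its tail, flattened via the quadratic sum-of-lists idiom into an edge list re-paired through a shared iterator) by a single linear scan over the sorted unique frames that maintains the current run's start and previous element and emits the run when it breaks.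
import Mathlib
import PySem

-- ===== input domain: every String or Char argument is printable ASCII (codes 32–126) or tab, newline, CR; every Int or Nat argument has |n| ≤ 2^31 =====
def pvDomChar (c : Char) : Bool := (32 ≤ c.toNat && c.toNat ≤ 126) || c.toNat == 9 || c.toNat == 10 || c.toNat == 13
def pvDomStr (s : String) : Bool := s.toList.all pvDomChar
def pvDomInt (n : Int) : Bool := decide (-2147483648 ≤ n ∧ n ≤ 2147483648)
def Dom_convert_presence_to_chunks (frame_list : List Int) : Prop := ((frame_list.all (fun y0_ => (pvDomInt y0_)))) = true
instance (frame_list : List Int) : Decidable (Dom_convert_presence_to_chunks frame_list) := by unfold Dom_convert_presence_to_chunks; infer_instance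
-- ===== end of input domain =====

-- B replaces A's gap-table + iterator re-pairing (with its quadratic sum-of-lists flattening)
-- by one linear scan keeping the current run's start/prev (objective: faster, measured). Both programs are pure.

-- ===== PORT A =====
-- list(zip(it, it)) on a single iterator: consecutive disjoint pairs (odd tail dropped)
def pvPairUp {α : Type} : List α → List (α × α)
  | a :: b :: rest => (a, b) :: pvPairUp rest
  | _ => []

def convert_presence_to_chunks (frame_list : List Int) : List (List Int) :=
  let nums := PySem.List.sorted (PySem.Set.ofList frame_list) (fun x => x) false
  let gaps := ((nums.zip (PySem.List.slice nums (some 1) none)).filter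
      (fun p => decide (p.1 + 1 < p.2))).map (fun p => [p.1, p.2])
  let edges := PySem.List.slice nums none (some 1) ++ gaps.flatten
      ++ PySem.List.slice nums (some (-1)) none
  let intermediate := pvPairUp edges
  intermediate.foldl (fun acc i => acc ++ [[i.1, i.2]]) []

-- ===== PORT B =====
def convert_presence_to_chunks_alt (frame_list : List Int) : List (List Int) :=
  let nums := PySem.List.sorted (PySem.Set.ofList frame_list) (fun x => x) false
  match nums with
  | [] => []
  | n0 :: rest =>
    let st := rest.foldl
      (fun (st : List (List Int) × Int × Int) x =>
        if x = st.2.2 + 1 then (st.1, st.2.1, x)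
        else (st.1 ++ [[st.2.1, st.2.2]], x, x))
      ([], n0, n0)
    st.1 ++ [[st.2.1, st.2.2]]

-- ===== PRECONDITION & SPEC =====
def Spec_convert_presence_to_chunks (frame_list : List Int) (out : List (List Int)) : Prop := out = convert_presence_to_chunks_alt frame_list
instance (frame_list : List Int) (out : List (List Int)) : Decidable (Spec_convert_presence_to_chunks frame_list out) := by unfold Spec_convert_presence_to_chunks; infer_instance

-- ===== CLAIM (what is proved, stated in full; the proofs are below) =====
def Claim_equal_convert_presence_to_chunks : Prop := ∀ (frame_list : List Int), Dom_convert_presence_to_chunks frame_list → Spec_convert_presence_to_chunks frame_list (convert_presence_to_chunks frame_list)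

-- ===== LEMMAS AND PROOFS =====

-- the flattened gap list of A, on a given nums
def pvGapsFlat (nums : List Int) : List Int :=
  (((nums.zip nums.tail).filter (fun p => decide (p.1 + 1 < p.2))).map
    (fun p => [p.1, p.2])).flatten

-- B's scan, written recursively (its foldl is reduced to this below)
def pvGo (s p : Int) : List Int → List (List Int)
  | [] => [[s, p]]
  | x :: xs => if x = p + 1 then pvGo s x xs else [s, p] :: pvGo x x xs

-- B's loop body, named so the foldl can be reasoned about
def pvStep (st : List (List Int) × Int × Int) (x : Int) : List (List Int) × Int × Int :=
  if x = st.2.2 + 1 then (st.1, st.2.1, x) else (st.1 ++ [[st.2.1, st.2.2]], x, x)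

theorem pvFoldl_append (l : List (Int × Int)) (acc : List (List Int)) :
    l.foldl (fun acc i => acc ++ [[i.1, i.2]]) acc
      = acc ++ l.map (fun i => [i.1, i.2]) := by
  induction l generalizing acc with
  | nil => simp
  | cons a t ih => simp [List.foldl, ih]

theorem pvB_foldl (rest : List Int) (acc : List (List Int)) (s p : Int) :
    (rest.foldl pvStep (acc, s, p)).1
      ++ [[(rest.foldl pvStep (acc, s, p)).2.1, (rest.foldl pvStep (acc, s, p)).2.2]]
      = acc ++ pvGo s p rest := by
  induction rest generalizing acc s p with
  | nil => simp [pvGo]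
  | cons x xs ih =>
    simp only [List.foldl_cons]
    by_cases h : x = p + 1
    · rw [show pvStep (acc, s, p) x = (acc, s, x) from by simp [pvStep, h], ih]
      simp [pvGo, h]
    · rw [show pvStep (acc, s, p) x = (acc ++ [[s, p]], x, x) from by simp [pvStep, h],
        ih]
      simp [pvGo, h]

theorem pvLastDrop (p : Int) (rest : List Int) :
    (p :: rest).drop ((p :: rest).length - 1) = [rest.getLastD p] := by
  induction rest generalizing p with
  | nil => simp
  | cons y ys ih =>
    have h1 : (p :: y :: ys).length - 1 = ys.length + 1 := by simp
    rw [h1, List.drop_succ_cons, List.getLastD_cons]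
    simpa using ih y

theorem pvMain (rest : List Int) (s p : Int)
    (h : (p :: rest).Pairwise (· < ·)) :
    (pvPairUp ((s :: pvGapsFlat (p :: rest)) ++ [rest.getLastD p])).map
        (fun i => [i.1, i.2]) = pvGo s p rest := by
  induction rest generalizing s p with
  | nil => simp [pvGapsFlat, pvPairUp, pvGo]
  | cons y ys ih =>
    have hpy : p < y := (List.pairwise_cons.mp h).1 y (by simp)
    have htail : (y :: ys).Pairwise (· < ·) := (List.pairwise_cons.mp h).2
    have hgaps : pvGapsFlat (p :: y :: ys)
        = (if p + 1 < y then [p, y] else []) ++ pvGapsFlat (y :: ys) := by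
      simp only [pvGapsFlat, List.tail, List.zip, List.zipWith, List.filter]
      by_cases hg : p + 1 < y <;> simp [hg]
    by_cases hg : p + 1 < y
    · have hne : y ≠ p + 1 := by omega
      rw [hgaps]
      simp only [if_pos hg, List.cons_append, List.nil_append, List.getLastD_cons]
      rw [show pvPairUp (s :: p :: y :: (pvGapsFlat (y :: ys) ++ [ys.getLastD y]))
            = (s, p) :: pvPairUp ((y :: pvGapsFlat (y :: ys)) ++ [ys.getLastD y]) from rfl]
      simp only [List.map_cons, List.cons_append] at *
      rw [ih y y htail]
      simp [pvGo, hne]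
    · have hy : y = p + 1 := by omega
      rw [hgaps]
      simp only [if_neg hg, List.nil_append, List.getLastD_cons]
      rw [ih s y htail]
      simp [pvGo, hy]

-- ===== VERDICT (by name: the statement is the Claim_ definition above) =====
theorem convert_presence_to_chunks_spec : Claim_equal_convert_presence_to_chunks := by
  intro frame_list _
  show convert_presence_to_chunks frame_list = convert_presence_to_chunks_alt frame_list
  unfold convert_presence_to_chunks convert_presence_to_chunks_alt
  have hpw : (PySem.List.sorted (PySem.Set.ofList frame_list) (fun x => x) false).Pairwise
      (· < ·) := PySem.List.sorted_ofList_pairwise_lt frame_list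
  cases hc : PySem.List.sorted (PySem.Set.ofList frame_list) (fun x => x) false with
  | nil => simp [pvPairUp, PySem.List.slice]
  | cons n0 rest =>
    rw [hc] at hpw
    dsimp only
    rw [show PySem.List.slice (n0 :: rest) (some 1) none = (n0 :: rest).tail from by
      simpa using PySem.List.slice_from_natCast (xs := n0 :: rest) (a := 1)]
    rw [PySem.List.slice_from_neg_one]
    rw [show PySem.List.slice (n0 :: rest) none (some 1) = (n0 :: rest).take 1 from by
      simpa using PySem.List.slice_to_natCast (xs := n0 :: rest) (b := 1)]
    rw [pvLastDrop]
    rw [show ((fun st x => if x = st.2.2 + 1 then (st.1, st.2.1, x)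
          else (st.1 ++ [[st.2.1, st.2.2]], x, x)) :
          List (List Int) × Int × Int → Int → List (List Int) × Int × Int) = pvStep from rfl]
    rw [show (n0 :: rest).take 1 ++
        ((((n0 :: rest).zip (n0 :: rest).tail).filter (fun p => decide (p.1 + 1 < p.2))).map
          (fun p => [p.1, p.2])).flatten ++ [rest.getLastD n0]
        = (n0 :: pvGapsFlat (n0 :: rest)) ++ [rest.getLastD n0] from by simp [pvGapsFlat]]
    rw [pvFoldl_append, List.nil_append, pvMain rest n0 n0 hpw]
    exact (pvB_foldl rest [] n0 n0).symm
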